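-- pv_equiv track=rewrite | github.com/magicmonkey/adventofcode | 2023/3/main.py | get_full_num_at_coord
-- ===== SOURCE A (Python) =====
-- def get_full_num_at_coord(chars, x, y) -> int:
--     num = ''
--     s = "".join(chars[y])
--     # Iterate from the given location to the end
--     for i in range(x, len(s)):
--         if s[i].isdigit():
--             num += s[i]
--         else:
--             break
--     # Iterate from the given location to the start
--     for i in range(x-1, -1, -1):
--         if s[i].isdigit():
--             num = s[i] + num
--         else:
--             break
--     return(int(num))
-- ===== SOURCE B (Python) =====
-- def get_full_num_at_coord(chars, x, y) -> int:
--     # One left-to-right pass over the row: enumerate the maximal digit runs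
--     # and return the run whose span [i, j] touches x (j exclusive end; j == x
--     # covers a number ending just before a non-digit at x).
--     s = "".join(chars[y])
--     n = len(s)
--     i = 0
--     while i < n:
--         if s[i].isdigit():
--             j = i
--             while j < n and s[j].isdigit():
--                 j += 1
--             if i <= x <= j:
--                 return int(s[i:j])
--             i = j
--         else:
--             i += 1
--     raise ValueError("no number at (%r, %r)" % (x, y))
-- ===== Notes on version B (the rewrite author's own statement) =====
-- stated objective: alternative
-- what changed: A scans locally from x rightwards then leftwards to assemble the digits; B makes a single left-to-right pass over the row enumerating maximal digit runs and returns the run whose [start, end] span touches x.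
-- outside the precondition, e.g. on get_full_num_at_coord([['1', '2', '3']], -1, 0): A returns 3123, B raises ValueError
import Mathlib
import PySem

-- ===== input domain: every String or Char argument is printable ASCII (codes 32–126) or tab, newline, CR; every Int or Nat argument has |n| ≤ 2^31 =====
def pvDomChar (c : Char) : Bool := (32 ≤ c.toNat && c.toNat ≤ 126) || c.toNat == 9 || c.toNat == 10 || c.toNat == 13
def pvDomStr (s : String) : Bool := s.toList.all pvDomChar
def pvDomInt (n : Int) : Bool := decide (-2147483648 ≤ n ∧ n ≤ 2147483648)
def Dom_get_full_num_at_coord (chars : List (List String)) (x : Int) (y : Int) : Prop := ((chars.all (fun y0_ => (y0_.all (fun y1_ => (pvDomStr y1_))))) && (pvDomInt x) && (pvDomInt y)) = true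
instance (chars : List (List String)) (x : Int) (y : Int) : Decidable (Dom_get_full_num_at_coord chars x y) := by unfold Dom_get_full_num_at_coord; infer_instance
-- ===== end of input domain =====

-- B replaces A's local right-then-left scan around x by a single left-to-right
-- enumeration of the maximal digit runs of the row, returning the run whose
-- span touches x (objective: alternative algorithm, same asymptotic cost).

-- ===== PORT A =====
-- A's "for i in range(..): collect digit else break" loop body, used for both directions
def pvAScan : List Char → List Char
  | [] => []
  | c :: t => if PySem.Chars.isdigit c then c :: pvAScan t else []

def get_full_num_at_coord (chars : List (List String)) (x : Int) (y : Int) : Int :=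
  -- s = "".join(chars[y])  (chars[y] out of range raises IndexError: excluded by Pre_)
  let row := (PySem.List.pyGet? chars y).getD []
  let s := PySem.Chars.join [] (row.map String.toList)
  -- first loop: scan right from x appending digits until a non-digit
  let numR := pvAScan (s.drop x.toNat)
  -- second loop: scan left from x-1 prepending digits until a non-digit
  let numL := (pvAScan (s.take x.toNat).reverse).reverse
  -- int(num)  (empty num raises ValueError: excluded by Pre_)
  (PySem.Int.ofChars? (numL ++ numR)).getD 0

-- ===== PORT B =====
-- B's outer while: walk the row once; on a digit at index i the inner while
-- advances j over the maximal run (= takeWhile); return the run if i <= x <= j.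
def pvBGo (x : Int) (i : Nat) : List Char → Option (List Char)
  | [] => none
  | c :: t =>
    if PySem.Chars.isdigit c then
      if (i : Int) ≤ x ∧ x ≤ ((i + 1 + (t.takeWhile PySem.Chars.isdigit).length : Nat) : Int) then
        some (c :: t.takeWhile PySem.Chars.isdigit)
      else pvBGo x (i + 1 + (t.takeWhile PySem.Chars.isdigit).length) (t.drop (t.takeWhile PySem.Chars.isdigit).length)
    else pvBGo x (i + 1) t
termination_by l => l.length
decreasing_by all_goals simp <;> omega

def get_full_num_at_coord_alt (chars : List (List String)) (x : Int) (y : Int) : Int :=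
  let row := (PySem.List.pyGet? chars y).getD []
  let s := PySem.Chars.join [] (row.map String.toList)
  match pvBGo x 0 s with
  | some run => (PySem.Int.ofChars? run).getD 0
  | none => 0   -- B raises ValueError here: excluded by Pre_

-- ===== PRECONDITION & SPEC =====
-- Pre_ = the inputs on which A returns normally, minus negative x: row index y in
-- range, 0 ≤ x ≤ len(row string), and a digit at x or just before x (otherwise
-- A raises IndexError or int('') ValueError).  Pre_ excludes negative x, on
-- which A may still return a number glued together by Python's negative-index
-- wraparound while B (naturally) raises ValueError.
def Pre_get_full_num_at_coord (chars : List (List String)) (x : Int) (y : Int) : Prop :=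
  let s := PySem.Chars.join [] ((((PySem.List.pyGet? chars y).getD []).map String.toList))
  (PySem.List.pyGet? chars y).isSome = true ∧ 0 ≤ x ∧ x ≤ s.length ∧
    (PySem.Chars.isdigit (s.getD x.toNat ' ') = true ∨
      (1 ≤ x ∧ PySem.Chars.isdigit (s.getD (x.toNat - 1) ' ') = true))
instance (chars : List (List String)) (x : Int) (y : Int) : Decidable (Pre_get_full_num_at_coord chars x y) := by unfold Pre_get_full_num_at_coord; infer_instance

def pvWitness_get_full_num_at_coord : List (List String) × Int × Int := ([["4", "2", "."]], 2, 0)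

def Spec_get_full_num_at_coord (chars : List (List String)) (x : Int) (y : Int) (out : Int) : Prop := out = get_full_num_at_coord_alt chars x y
instance (chars : List (List String)) (x : Int) (y : Int) (out : Int) : Decidable (Spec_get_full_num_at_coord chars x y out) := by unfold Spec_get_full_num_at_coord; infer_instance

-- ===== CLAIM (what is proved, stated in full; the proofs are below) =====
def Claim_equal_get_full_num_at_coord : Prop := ∀ (chars : List (List String)) (x : Int) (y : Int), Dom_get_full_num_at_coord chars x y → Pre_get_full_num_at_coord chars x y → Spec_get_full_num_at_coord chars x y (get_full_num_at_coord chars x y)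

-- ===== LEMMAS AND PROOFS =====

-- 'is there a digit at index k' (out of range counts as no digit)
def pvDigAt (s : List Char) (k : Nat) : Bool := PySem.Chars.isdigit (s.getD k ' ')

theorem pvAScan_eq_takeWhile (l : List Char) : pvAScan l = l.takeWhile PySem.Chars.isdigit := by
  induction l with
  | nil => rfl
  | cons c t ih => simp only [pvAScan, List.takeWhile_cons, ih]

theorem takeWhile_append_cons_neg {p : Char → Bool} {c : Char} (hc : p c = false)
    (v w : List Char) : (v ++ c :: w).takeWhile p = v.takeWhile p := by
  induction v with
  | nil => simp [hc]
  | cons a v ih => simp only [List.cons_append, List.takeWhile_cons]; split <;> simp_all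

theorem takeWhile_append_pos {p : Char → Bool} (v w : List Char)
    (hv : ∀ a ∈ v, p a = true) : (v ++ w).takeWhile p = v ++ w.takeWhile p := by
  induction v with
  | nil => simp
  | cons a v ih => simp_all

theorem dropWhile_head_false {p : Char → Bool} (l : List Char) {c : Char} {r : List Char}
    (h : l.dropWhile p = c :: r) : p c = false := by
  induction l with
  | nil => simp [List.dropWhile] at h
  | cons a t ih =>
    rw [List.dropWhile_cons] at h
    split at h
    · exact ih h
    · cases h; simp_all

theorem digAt_dropWhile_zero (t : List Char) :
    pvDigAt (t.dropWhile PySem.Chars.isdigit) 0 = false := by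
  cases h : t.dropWhile PySem.Chars.isdigit with
  | nil => decide
  | cons c r =>
    simp only [pvDigAt, List.getD, List.getElem?_cons_zero, Option.getD_some]
    exact dropWhile_head_false t h

theorem pvDigAt_append_right (D R : List Char) (k : Nat) :
    pvDigAt (D ++ R) (D.length + k) = pvDigAt R k := by
  simp [pvDigAt, List.getD, List.getElem?_append_right (Nat.le_add_right D.length k)]

theorem length_takeWhile_le' {p : Char → Bool} (t : List Char) :
    (t.takeWhile p).length ≤ t.length := (List.takeWhile_sublist p).length_le

theorem drop_length_takeWhile {p : Char → Bool} (t : List Char) :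
    t.drop (t.takeWhile p).length = t.dropWhile p := by
  nth_rewrite 2 [← List.takeWhile_append_dropWhile (p := p) (l := t)]
  rw [List.drop_left]

-- the heart: B's run search returns exactly A's left-scan ++ right-scan
theorem pvBGo_eq : ∀ (n : Nat) (s : List Char), s.length ≤ n → ∀ (k i : Nat), k ≤ s.length →
    (pvDigAt s k = true ∨ (1 ≤ k ∧ pvDigAt s (k - 1) = true)) →
    pvBGo ((i : Int) + k) i s =
      some (((s.take k).reverse.takeWhile PySem.Chars.isdigit).reverse
            ++ (s.drop k).takeWhile PySem.Chars.isdigit) := by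
  intro n
  induction n with
  | zero =>
    intro s hs k i hk hd
    have : s = [] := List.eq_nil_of_length_eq_zero (Nat.le_zero.mp hs)
    subst this
    rcases hd with h | ⟨_, h⟩ <;> simp [pvDigAt, PySem.Chars.isdigit] at h
  | succ n ih =>
    intro s hs k i hk hd
    match s with
    | [] =>
      rcases hd with h | ⟨_, h⟩ <;> simp [pvDigAt, PySem.Chars.isdigit] at h
    | c :: t =>
      have hslen : t.length + 1 ≤ n + 1 := by simpa using hs
      have hklen : k ≤ t.length + 1 := by simpa using hk
      by_cases hc : PySem.Chars.isdigit c = true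
      · -- digit at the head: the run is c :: takeWhile t
        set m := (t.takeWhile PySem.Chars.isdigit).length with hm
        have hmle : m ≤ t.length := length_takeWhile_le' t
        rw [pvBGo]
        simp only [hc, if_true]
        set D := c :: t.takeWhile PySem.Chars.isdigit with hD
        set R := t.dropWhile PySem.Chars.isdigit with hR
        have hsplit : c :: t = D ++ R := by
          simp [hD, hR, List.takeWhile_append_dropWhile]
        have hDdig : ∀ a ∈ D, PySem.Chars.isdigit a = true := by
          intro a ha
          rcases List.mem_cons.mp ha with rfl | ha
          · exact hc
          · exact List.mem_takeWhile_imp ha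
        have hDlen : D.length = 1 + m := by simp [hD, hm]; omega
        by_cases hkm : k ≤ 1 + m
        · have hcond : (i : Int) ≤ (i : Int) + k ∧ (i : Int) + k ≤ ((i + 1 + m : Nat) : Int) := by
            constructor
            · omega
            · push_cast; omega
          rw [if_pos hcond]
          have hkD : k ≤ D.length := by omega
          rw [hsplit, List.take_append_of_le_length hkD, List.drop_append_of_le_length hkD]
          have h1 : ((D.take k).reverse.takeWhile PySem.Chars.isdigit).reverse = D.take k := by
            rw [List.takeWhile_eq_self_iff.mpr, List.reverse_reverse]
            intro a ha
            exact hDdig a (List.mem_of_mem_take (List.mem_reverse.mp ha))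
          have h2 : (D.drop k ++ R).takeWhile PySem.Chars.isdigit = D.drop k := by
            rw [takeWhile_append_pos _ _ (fun a ha => hDdig a (List.mem_of_mem_drop ha))]
            have hnil : R.takeWhile PySem.Chars.isdigit = [] := by
              cases hRc : R with
              | nil => simp
              | cons c' r' => simp [dropWhile_head_false t (hR ▸ hRc)]
            simp [hnil]
          rw [h1, h2, List.take_append_drop]
        · -- x beyond this run: recurse on the rest of the row
          have hcond : ¬ ((i : Int) ≤ (i : Int) + k ∧ (i : Int) + k ≤ ((i + 1 + m : Nat) : Int)) := by
            push_cast; omega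
          rw [if_neg hcond]
          have htd : t.drop m = R := drop_length_takeWhile t
          set k' := k - 1 - m with hk'
          have hk'1 : 1 ≤ k' := by omega
          have hRlen : R.length = t.length - m := by rw [← htd]; simp
          have hk'le : k' ≤ R.length := by omega
          have hd' : pvDigAt R k' = true ∨ (1 ≤ k' ∧ pvDigAt R (k' - 1) = true) := by
            rcases hd with h | ⟨h1, h⟩
            · left
              have e := pvDigAt_append_right D R k'
              rw [← hsplit] at e
              have : D.length + k' = k := by omega
              rw [this] at e
              rw [← e]; exact h
            · by_cases hkm2 : k - 1 = m + 1
              · -- the claimed digit just before x would be R's non-digit head: impossible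
                exfalso
                have e := pvDigAt_append_right D R 0
                rw [← hsplit] at e
                have hDk : D.length + 0 = k - 1 := by omega
                rw [hDk] at e
                rw [e, hR, digAt_dropWhile_zero] at h
                exact Bool.false_ne_true h
              · right
                refine ⟨by omega, ?_⟩
                have e := pvDigAt_append_right D R (k' - 1)
                rw [← hsplit] at e
                have : D.length + (k' - 1) = k - 1 := by omega
                rw [this] at e
                rw [← e]; exact h
          have hrec := ih R (by omega) k' (i + 1 + m) hk'le hd'
          have hxeq : ((i + 1 + m : Nat) : Int) + (k' : Int) = (i : Int) + k := by push_cast; omega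
          rw [hxeq] at hrec
          rw [htd, hrec]
          have htake : (c :: t).take k = D ++ R.take k' := by
            rw [hsplit, List.take_append, List.take_of_length_le (by omega)]
            congr 2
            omega
          have hdrop : (c :: t).drop k = R.drop k' := by
            rw [hsplit, List.drop_append, List.drop_eq_nil_of_le (by omega), List.nil_append]
            congr 1
            omega
          rw [htake, hdrop]
          -- the left scan stops at R's non-digit head either way
          obtain ⟨c', r', hRc⟩ : ∃ c' r', R = c' :: r' :=
            List.exists_cons_of_ne_nil (by
              intro hnil
              rw [hnil] at hk'le
              simp only [List.length_nil] at hk'le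
              omega)
          have hc' : PySem.Chars.isdigit c' = false :=
            dropWhile_head_false t (by rw [← hR]; exact hRc)
          have hks : k' = (k' - 1) + 1 := by omega
          have hRt : R.take k' = c' :: r'.take (k' - 1) := by
            conv_lhs => rw [hRc, hks]
            rw [List.take_succ_cons]
          rw [hRt]
          congr 2
          have e1 : (c' :: r'.take (k' - 1)).reverse = (r'.take (k' - 1)).reverse ++ c' :: [] := by simp
          have e2 : (D ++ c' :: r'.take (k' - 1)).reverse = (r'.take (k' - 1)).reverse ++ c' :: D.reverse := by simp
          rw [e1, e2, takeWhile_append_cons_neg hc', takeWhile_append_cons_neg hc']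
      · -- non-digit at the head: step right, x shifts down by one
        have hc' : PySem.Chars.isdigit c = false := by simpa using hc
        have hk1 : 1 ≤ k := by
          rcases hd with h | ⟨h1, _⟩
          · by_contra hk0
            have : k = 0 := by omega
            subst this
            simp [pvDigAt, hc'] at h
          · exact h1
        rw [pvBGo]
        simp only [hc', Bool.false_eq_true, if_false]
        obtain ⟨k0, rfl⟩ : ∃ k0, k = k0 + 1 := ⟨k - 1, by omega⟩
        have hd' : pvDigAt t k0 = true ∨ (1 ≤ k0 ∧ pvDigAt t (k0 - 1) = true) := by
          rcases hd with h | ⟨_, h⟩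
          · left
            simpa [pvDigAt, List.getD] using h
          · right
            cases k0 with
            | zero => simp [pvDigAt, hc'] at h
            | succ k1 =>
              refine ⟨by omega, ?_⟩
              simpa [pvDigAt, List.getD] using h
        have hrec := ih t (by omega) k0 (i + 1) (by omega) hd'
        have hxeq : ((i + 1 : Nat) : Int) + (k0 : Int) = (i : Int) + ((k0 + 1 : Nat) : Int) := by push_cast; omega
        rw [hxeq] at hrec
        rw [hrec]
        have h1 : (c :: t).take (k0 + 1) = c :: t.take k0 := rfl
        have h2 : (c :: t.take k0).reverse = (t.take k0).reverse ++ c :: [] := by simp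
        have h3 : (c :: t).drop (k0 + 1) = t.drop k0 := rfl
        rw [h1, h2, h3, takeWhile_append_cons_neg hc']

-- ===== VERDICT (by name: the statement is the Claim_ definition above) =====
theorem get_full_num_at_coord_spec : Claim_equal_get_full_num_at_coord := by
  unfold Claim_equal_get_full_num_at_coord
  intro chars x y _ hpre
  obtain ⟨hy, hx0, hxle, hdig⟩ := hpre
  unfold Spec_get_full_num_at_coord get_full_num_at_coord get_full_num_at_coord_alt
  set s := PySem.Chars.join [] ((((PySem.List.pyGet? chars y).getD []).map String.toList)) with hs
  set k := x.toNat with hkdef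
  have hxk : x = (k : Int) := (Int.toNat_of_nonneg hx0).symm
  have hk : k ≤ s.length := by omega
  have hd : pvDigAt s k = true ∨ (1 ≤ k ∧ pvDigAt s (k - 1) = true) := by
    rcases hdig with h | ⟨h1, h⟩
    · left; exact h
    · right; exact ⟨by omega, h⟩
  have h := pvBGo_eq s.length s le_rfl k 0 hk hd
  have h0 : ((0 : Nat) : Int) + (k : Int) = x := by omega
  rw [h0] at h
  simp only [pvAScan_eq_takeWhile, ← hs, h]
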